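-- pv_equiv track=rewrite | github.com/zm1060/WebsiteCollectAndAnalysis | analysis/count_cdn.py | extract_aliases
-- ===== SOURCE A (Python) =====
-- def extract_aliases(lines, start_index):
--     aliases = []
--     for i in range(start_index, len(lines)):
--         if lines[i].startswith('Aliases:'):
--             aliases_part = lines[i].split('Aliases:')[1].strip()
--             aliases.extend(addr.strip() for addr in aliases_part.split(','))
--         elif lines[i].startswith((' ', '\t')):
--             aliases.extend(addr.strip() for addr in lines[i].split(','))
--         elif lines[i].startswith(('Name:', 'Addresses:', 'Address')) or lines[i].strip() == '':
--             break
--     return aliases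
-- ===== SOURCE B (Python) =====
-- def _is_terminator(line):
--     # A continuation line ('Aliases:' or indented) never terminates the block.
--     if line.startswith('Aliases:') or line.startswith((' ', '\t')):
--         return False
--     return line.startswith(('Name:', 'Addresses:', 'Address')) or line.strip() == ''
--
--
-- def extract_aliases(lines, start_index):
--     # Pass 1: capture the contiguous block up to the first terminator line.
--     block = []
--     for i in range(start_index, len(lines)):
--         if _is_terminator(lines[i]):
--             break
--         block.append(lines[i])
--     # Pass 2: parse the captured block.
--     aliases = []
--     for line in block:
--         if line.startswith('Aliases:'):
--             part = line.split('Aliases:')[1].strip()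
--             aliases.extend(a.strip() for a in part.split(','))
--         elif line.startswith((' ', '\t')):
--             aliases.extend(a.strip() for a in line.split(','))
--     return aliases
-- ===== Notes on version B (the rewrite author's own statement) =====
-- stated objective: alternative
-- what changed: Splits A's single indexed loop with an inline break into two passes: a boundary-finding pass that captures the contiguous block before the first terminator line (with the terminator predicate factored into a named helper), then a separate parsing fold over that captured block.
import Mathlib
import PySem

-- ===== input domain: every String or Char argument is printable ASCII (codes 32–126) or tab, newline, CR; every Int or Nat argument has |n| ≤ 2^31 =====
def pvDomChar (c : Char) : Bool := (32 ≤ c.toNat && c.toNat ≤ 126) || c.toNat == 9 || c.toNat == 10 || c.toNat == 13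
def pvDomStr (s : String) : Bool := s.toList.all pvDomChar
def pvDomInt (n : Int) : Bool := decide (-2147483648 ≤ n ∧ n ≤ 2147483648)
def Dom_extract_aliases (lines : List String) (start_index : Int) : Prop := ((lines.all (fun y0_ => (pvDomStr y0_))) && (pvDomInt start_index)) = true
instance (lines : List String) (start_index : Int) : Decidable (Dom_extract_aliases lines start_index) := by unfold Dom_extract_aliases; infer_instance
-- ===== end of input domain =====

-- B restructures A's single indexed loop with an inline break into two passes (capture the
-- block before the first terminator line, then parse it); same cost, different decomposition.
-- The literal parsing expressions of the two branch bodies are identical in both Pythons, so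
-- both ports share their transliterations (pvAliasesContrib / pvIndentContrib / pvIndent).

-- line.startswith((' ', '\t'))
def pvIndent (l : String) : Bool :=
  PySem.Str.startswith l " " || PySem.Str.startswith l "\t"

-- lines in the 'Aliases:' branch: line.split('Aliases:')[1].strip(), then comma-split + strip.
-- ([1] always exists there since 'Aliases:' is a prefix of the line; the getD "" is unreached)
def pvAliasesContrib (l : String) : List String :=
  let part := PySem.Str.strip ((PySem.List.pyGet? ((PySem.Str.split? l "Aliases:").getD []) 1).getD "")
  ((PySem.Str.split? part ",").getD []).map PySem.Str.strip

-- indented branch: [addr.strip() for addr in line.split(',')]  (',' ≠ "", split? is some)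
def pvIndentContrib (l : String) : List String :=
  ((PySem.Str.split? l ",").getD []).map PySem.Str.strip

-- ===== PORT A =====
-- the for-loop over range(start_index, len(lines)) with break; IndexError (pyGet? = none,
-- excluded by Pre_) is rendered as getD ""
def pvGoA (lines : List String) : List Int → List String → List String
  | [], acc => acc
  | i :: rest, acc =>
    let l := (PySem.List.pyGet? lines i).getD ""
    if PySem.Str.startswith l "Aliases:" then pvGoA lines rest (acc ++ pvAliasesContrib l)
    else if pvIndent l then pvGoA lines rest (acc ++ pvIndentContrib l)
    else if PySem.Str.startswith l "Name:" || PySem.Str.startswith l "Addresses:" ||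
            PySem.Str.startswith l "Address" || (PySem.Str.strip l == "") then acc
    else pvGoA lines rest acc

def extract_aliases (lines : List String) (start_index : Int) : List String :=
  pvGoA lines (PySem.List.pyRange start_index (lines.length : Int) 1) []

-- ===== PORT B =====
-- helper _is_terminator
def pvIsTerminator (l : String) : Bool :=
  if PySem.Str.startswith l "Aliases:" || PySem.Str.startswith l " " || PySem.Str.startswith l "\t" then
    false
  else
    PySem.Str.startswith l "Name:" || PySem.Str.startswith l "Addresses:" ||
    PySem.Str.startswith l "Address" || (PySem.Str.strip l == "")

-- pass 1: capture the block up to the first terminator (IndexError excluded by Pre_, as above)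
def pvBlock (lines : List String) : List Int → List String
  | [] => []
  | i :: rest =>
    let l := (PySem.List.pyGet? lines i).getD ""
    if pvIsTerminator l then [] else l :: pvBlock lines rest

-- pass 2: parse the captured block
def pvParse (block : List String) : List String :=
  block.foldl
    (fun acc l =>
      if PySem.Str.startswith l "Aliases:" then acc ++ pvAliasesContrib l
      else if pvIndent l then acc ++ pvIndentContrib l
      else acc)
    []

def extract_aliases_alt (lines : List String) (start_index : Int) : List String :=
  pvParse (pvBlock lines (PySem.List.pyRange start_index (lines.length : Int) 1))

-- ===== PRECONDITION & SPEC =====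
-- Pre_ excludes exactly start_index < -len(lines) (with start_index < len(lines)), where the
-- Python A raises IndexError on lines[start_index]; A returns normally on all other inputs.
def Pre_extract_aliases (lines : List String) (start_index : Int) : Prop :=
  -(lines.length : Int) ≤ start_index
instance (lines : List String) (start_index : Int) : Decidable (Pre_extract_aliases lines start_index) := by unfold Pre_extract_aliases; infer_instance

def pvWitness_extract_aliases : List String × Int :=
  (["Aliases: a.example.com, b.example.com", "  c.example.com", "Address: 1.2.3.4"], 0)

def Spec_extract_aliases (lines : List String) (start_index : Int) (out : List String) : Prop := out = extract_aliases_alt lines start_index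
instance (lines : List String) (start_index : Int) (out : List String) : Decidable (Spec_extract_aliases lines start_index out) := by unfold Spec_extract_aliases; infer_instance

-- ===== CLAIM (what is proved, stated in full; the proofs are below) =====
def Claim_equal_extract_aliases : Prop := ∀ (lines : List String) (start_index : Int), Dom_extract_aliases lines start_index → Pre_extract_aliases lines start_index → Spec_extract_aliases lines start_index (extract_aliases lines start_index)

-- ===== LEMMAS AND PROOFS =====

-- pvParse's fold from an arbitrary accumulator prepends that accumulator
lemma pvParse_foldl_acc (block : List String) (acc : List String) :
    block.foldl
      (fun acc l =>
        if PySem.Str.startswith l "Aliases:" then acc ++ pvAliasesContrib l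
        else if pvIndent l then acc ++ pvIndentContrib l
        else acc)
      acc = acc ++ pvParse block := by
  induction block generalizing acc with
  | nil => simp [pvParse]
  | cons l rest ih =>
    simp only [pvParse, List.foldl_cons]
    split_ifs
    · rw [ih, ih]; simp
    · rw [ih, ih]; simp
    · exact ih acc

-- one step of pvParse
lemma pvParse_cons (l : String) (blk : List String) :
    pvParse (l :: blk) =
      (if PySem.Str.startswith l "Aliases:" then pvAliasesContrib l
       else if pvIndent l then pvIndentContrib l
       else []) ++ pvParse blk := by
  simp only [pvParse, List.foldl_cons]
  rw [pvParse_foldl_acc]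
  split_ifs <;> simp only [List.nil_append, pvParse]

-- the single loop of A equals capture-then-parse of B, over any index list
lemma pvGoA_eq (lines : List String) (idxs : List Int) (acc : List String) :
    pvGoA lines idxs acc = acc ++ pvParse (pvBlock lines idxs) := by
  induction idxs generalizing acc with
  | nil => simp [pvGoA, pvBlock, pvParse]
  | cons i rest ih =>
    simp only [pvGoA, pvBlock]
    set l := (PySem.List.pyGet? lines i).getD "" with hl
    by_cases h1 : PySem.Str.startswith l "Aliases:" = true
    · have ht : pvIsTerminator l = false := by
        unfold pvIsTerminator; rw [h1]; simp only [Bool.true_or, if_true]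
      simp only [h1, ht, Bool.false_eq_true, if_true, if_false, ih, pvParse_cons,
        List.append_assoc]
    · have h1' : PySem.Str.startswith l "Aliases:" = false := eq_false_of_ne_true h1
      by_cases h2 : pvIndent l = true
      · have ht : pvIsTerminator l = false := by
          unfold pvIndent at h2
          unfold pvIsTerminator
          rw [h1']
          rcases Bool.or_eq_true_iff.mp h2 with h | h <;> rw [h] <;>
            simp only [Bool.true_or, Bool.or_true, Bool.false_or, if_true]
        simp only [h1, h2, ht, Bool.false_eq_true, if_true, if_false, ih, pvParse_cons,
          List.append_assoc]
      · have h2' : pvIndent l = false := eq_false_of_ne_true h2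
        have hsp : PySem.Str.startswith l " " = false ∧ PySem.Str.startswith l "\t" = false := by
          unfold pvIndent at h2'
          constructor
          · cases hb : PySem.Str.startswith l " " with
            | false => rfl
            | true => rw [hb] at h2'; simp at h2'
          · cases hb : PySem.Str.startswith l "\t" with
            | false => rfl
            | true => rw [hb] at h2'; simp at h2' 
        by_cases h3 : (PySem.Str.startswith l "Name:" || PySem.Str.startswith l "Addresses:" ||
            PySem.Str.startswith l "Address" || (PySem.Str.strip l == "")) = true
        · have ht : pvIsTerminator l = true := by
            unfold pvIsTerminator
            rw [h1', hsp.1, hsp.2]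
            simp only [Bool.or_self, Bool.false_eq_true, if_false]
            exact h3
          simp only [h1, h2, h3, ht, Bool.false_eq_true, if_false, pvParse]
          simp
        · have h3' := eq_false_of_ne_true h3
          have ht : pvIsTerminator l = false := by
            unfold pvIsTerminator
            rw [h1', hsp.1, hsp.2]
            simp only [Bool.or_self, Bool.false_eq_true, if_false]
            exact h3'
          simp only [h1, h2, h3, ht, Bool.false_eq_true, if_false, ih, pvParse_cons,
            List.nil_append]

-- ===== VERDICT (by name: the statement is the Claim_ definition above) =====
theorem extract_aliases_spec : Claim_equal_extract_aliases := by
  intro lines start_index _ _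
  unfold Spec_extract_aliases extract_aliases extract_aliases_alt
  simpa using pvGoA_eq lines (PySem.List.pyRange start_index (lines.length : Int) 1) []
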